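-- pv_equiv track=rewrite | github.com/benhic200/appdar | scripts/dataset_editor.py | group_by_region
-- ===== SOURCE A (Python) =====
-- def group_by_region(entries):
--     """Group entries by regionHint, with a synthetic 'Global' group for null."""
--     order = ["UK", "US", "AU", "NZ", "Global"]
--     groups = {r: [] for r in order}
--     for e in entries:
--         # For comma-separated regionHints like "US,NZ", key off the first region
--         raw = e["regionHint"] or "Global"
--         key = raw.split(",")[0] if raw != "Global" else "Global"
--         if key not in groups:
--             groups[key] = []
--         groups[key].append(e)
--     result = []
--     seen = set()
--     for r in order:
--         if groups.get(r):
--             result.append((r, groups[r]))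
--             seen.add(r)
--     for r, items in groups.items():
--         if r not in seen and items:
--             result.append((r, items))
--     return result
-- ===== SOURCE B (Python) =====
-- def group_by_region(entries):
--     """Group entries by regionHint, with a synthetic 'Global' group for null."""
--     order = ["UK", "US", "AU", "NZ", "Global"]
--
--     def key_of(e):
--         raw = e["regionHint"] or "Global"
--         return "Global" if raw == "Global" else raw.split(",")[0]
--
--     keys = [key_of(e) for e in entries]
--     regions = list(order)
--     for k in keys:
--         if k not in regions:
--             regions.append(k)
--     result = []
--     for r in regions:
--         items = [e for e, k in zip(entries, keys) if k == r]
--         if items: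
--             result.append((r, items))
--     return result
-- ===== Notes on version B (the rewrite author's own statement) =====
-- stated objective: alternative
-- what changed: A builds a pre-seeded dict of groups in one pass and then emits in two loops (known regions, then leftover dict items guarded by a seen-set); B computes each entry's region key once, builds the candidate-region list (known order plus first-appearance extras), and emits with one filter pass over the entries per candidate region, with no dict and no seen-set.
import Mathlib
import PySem

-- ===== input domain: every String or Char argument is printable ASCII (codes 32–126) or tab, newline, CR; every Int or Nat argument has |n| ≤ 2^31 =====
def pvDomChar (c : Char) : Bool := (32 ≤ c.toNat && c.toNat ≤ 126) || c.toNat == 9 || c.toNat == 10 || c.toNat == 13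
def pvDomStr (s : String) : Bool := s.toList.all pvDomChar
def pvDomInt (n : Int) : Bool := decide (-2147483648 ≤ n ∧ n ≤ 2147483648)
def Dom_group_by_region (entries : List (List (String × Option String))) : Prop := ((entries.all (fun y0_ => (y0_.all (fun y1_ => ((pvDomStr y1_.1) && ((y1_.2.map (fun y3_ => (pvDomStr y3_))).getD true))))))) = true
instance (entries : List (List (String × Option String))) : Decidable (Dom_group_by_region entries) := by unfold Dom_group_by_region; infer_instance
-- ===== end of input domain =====

-- B replaces A's dict-grouping with two emit loops (known order + leftover items with a seen-set)
-- by a candidate-region list and one filter pass per region; objective: alternative (not faster).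

-- ===== PORT A =====
def group_by_region (entries : List (List (String × Option String))) : List (String × (List (List (String × Option String)))) :=
  let order : List String := ["UK", "US", "AU", "NZ", "Global"]
  let groups : PySem.Dict String (List (List (String × Option String))) :=
    PySem.Dict.ofList (order.map (fun r => (r, [])))
  let groups := entries.foldl (fun g e =>
    let raw : String :=
      match e.find? (fun p => p.1 == "regionHint") with
      | some (_, some s) => if s = "" then "Global" else s   -- `or "Global"`: None and "" are falsy
      | _ => "Global"                                        -- missing key: KeyError, excluded by Pre_
    let key : String := if raw != "Global" then ((PySem.Str.split? raw ",").getD []).headD "" else "Global"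
    let g := if g.contains key then g else g.insert key []
    g.insert key (g.getD key [] ++ [e])) groups
  let rs := order.foldl
    (fun (rs : List (String × List (List (String × Option String))) × PySem.Set String) r =>
      if !(groups.getD r []).isEmpty then (rs.1 ++ [(r, groups.getD r [])], PySem.Set.add rs.2 r)
      else rs)
    ([], PySem.Set.empty)
  groups.items.foldl (fun res p =>
    if !(PySem.Set.contains rs.2 p.1) && !p.2.isEmpty then res ++ [p] else res) rs.1

-- ===== PORT B =====
-- key_of in Source B (missing key = KeyError in Python, excluded by Pre_; here it falls to "Global")
def pvKeyOf (e : List (String × Option String)) : String :=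
  let v : String := (((e.find? (fun p => p.1 == "regionHint")).bind (·.2)).getD "")
  let raw : String := if v == "" then "Global" else v   -- None and "" are falsy: `or "Global"`
  if raw == "Global" then "Global" else ((PySem.Str.split? raw ",").getD []).headD ""

def group_by_region_alt (entries : List (List (String × Option String))) : List (String × (List (List (String × Option String)))) :=
  let order : List String := ["UK", "US", "AU", "NZ", "Global"]
  let keys := entries.map pvKeyOf
  let regions := keys.foldl (fun rs k => if rs.contains k then rs else rs ++ [k]) order
  regions.foldl (fun res r =>
    let items := ((entries.zip keys).filter (fun p => p.2 == r)).map (·.1)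
    if !items.isEmpty then res ++ [(r, items)] else res) []

-- ===== PRECONDITION & SPEC =====
-- Pre_ excludes exactly the entries without a "regionHint" key, on which Python's A (and B) raise KeyError.
def Pre_group_by_region (entries : List (List (String × Option String))) : Prop :=
  entries.all (fun e => e.any (fun p => p.1 == "regionHint")) = true
instance (entries : List (List (String × Option String))) : Decidable (Pre_group_by_region entries) := by unfold Pre_group_by_region; infer_instance

def pvWitness_group_by_region : (List (List (String × Option String))) :=
  [[("regionHint", some "US,NZ")], [("regionHint", none)],
   [("regionHint", some "XX,UK"), ("name", some "a")], [("regionHint", some "")]]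

def Spec_group_by_region (entries : List (List (String × Option String))) (out : List (String × (List (List (String × Option String))))) : Prop := out = group_by_region_alt entries
instance (entries : List (List (String × Option String))) (out : List (String × (List (List (String × Option String))))) : Decidable (Spec_group_by_region entries out) := by unfold Spec_group_by_region; infer_instance

-- ===== CLAIM (what is proved, stated in full; the proofs are below) =====
def Claim_equal_group_by_region : Prop := ∀ (entries : List (List (String × Option String))), Dom_group_by_region entries → Pre_group_by_region entries → Spec_group_by_region entries (group_by_region entries)

-- ===== LEMMAS AND PROOFS =====

def pvOrder : List String := ["UK", "US", "AU", "NZ", "Global"]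

def pvD0 : PySem.Dict String (List (List (String × Option String))) :=
  PySem.Dict.ofList (pvOrder.map (fun r => (r, [])))

-- the group of region r: the entries whose key is r
def pvG (entries : List (List (String × Option String))) (r : String) :
    List (List (String × Option String)) :=
  entries.filter (fun e => pvKeyOf e == r)

def pvF (entries : List (List (String × Option String))) (r : String) :
    String × List (List (String × Option String)) :=
  (r, pvG entries r)

def pvP (entries : List (List (String × Option String))) (r : String) : Bool :=
  !(pvG entries r).isEmpty

-- A's inline key computation is pvKeyOf
theorem pvKey_eq (e : List (String × Option String)) :
    (let raw : String :=
      match e.find? (fun p => p.1 == "regionHint") with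
      | some (_, some s) => if s = "" then "Global" else s
      | _ => "Global"
    if raw != "Global" then ((PySem.Str.split? raw ",").getD []).headD "" else "Global")
      = pvKeyOf e := by
  unfold pvKeyOf
  cases h : e.find? (fun p => p.1 == "regionHint") with
  | none => simp
  | some pr =>
    rcases pr with ⟨a, b⟩
    cases b with
    | none => simp
    | some s =>
      by_cases hs : s = ""
      · simp [hs]
      · by_cases hg : s = "Global" <;> simp [hs, hg]

-- A's loop body is dict.modify at the entry's key
theorem pvStep_eq_modify (g : PySem.Dict String (List (List (String × Option String))))
    (e : List (String × Option String)) :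
    (let raw : String :=
      match e.find? (fun p => p.1 == "regionHint") with
      | some (_, some s) => if s = "" then "Global" else s
      | _ => "Global"
    let key : String := if raw != "Global" then ((PySem.Str.split? raw ",").getD []).headD "" else "Global"
    let g := if g.contains key then g else g.insert key []
    g.insert key (g.getD key [] ++ [e])) = g.modify (pvKeyOf e) [] (· ++ [e]) := by
  simp only [pvKey_eq e]
  by_cases hc : g.contains (pvKeyOf e) = true
  · simp [hc, PySem.Dict.modify]
  · simp only [Bool.not_eq_true] at hc
    simp [hc, PySem.Dict.modify, PySem.Dict.getD_insert_self,
      PySem.Dict.insert_insert_self, PySem.Dict.getD_of_not_contains g [] hc]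

theorem pvD0_eq : pvD0 = PySem.Dict.mk
    [("UK", []), ("US", []), ("AU", []), ("NZ", []), ("Global", [])] := by decide

theorem pvD0_getD (r : String) : pvD0.getD r [] = [] := by
  rw [pvD0_eq]
  simp [PySem.Dict.getD_eq_get?_getD, PySem.Dict.get?_mk_cons]
  split_ifs <;> rfl

def pvGroups (entries : List (List (String × Option String))) :
    PySem.Dict String (List (List (String × Option String))) :=
  entries.foldl (fun d e => d.modify (pvKeyOf e) [] (· ++ [e])) pvD0

theorem pvGroups_getD (entries : List (List (String × Option String))) (r : String) :
    (pvGroups entries).getD r [] = pvG entries r := by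
  have h := PySem.Dict.getD_foldl_modify_append
    (l := entries.map (fun e => (pvKeyOf e, e))) (d := pvD0) (c := r)
  rw [List.foldl_map] at h
  unfold pvGroups
  rw [h, pvD0_getD, List.filter_map, List.map_map]
  simp [pvG, Function.comp_def]

theorem pvGroups_keys (entries : List (List (String × Option String))) :
    (pvGroups entries).keys = PySem.Set.update pvOrder (entries.map pvKeyOf) := by
  unfold pvGroups
  rw [PySem.Dict.keys_foldl_modify_key entries pvKeyOf [] (fun _ e => (· ++ [e])) pvD0]
  have h : pvD0.keys = pvOrder := by decide
  rw [h]

theorem pvGroups_nodup (entries : List (List (String × Option String))) :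
    (pvGroups entries).keys.Nodup := by
  unfold pvGroups
  exact PySem.Dict.nodup_keys_foldl_modify_key entries pvKeyOf [] (fun _ e => (· ++ [e])) pvD0
    (by decide)

-- the filtered zip in B is the group of r
theorem pvZip_eq (entries : List (List (String × Option String))) (r : String) :
    ((entries.zip (entries.map pvKeyOf)).filter (fun p => p.2 == r)).map (·.1)
      = pvG entries r := by
  induction entries with
  | nil => simp [pvG]
  | cons e tl ih =>
    simp only [List.map_cons, List.zip_cons_cons, List.filter_cons, pvG] at *
    cases h : pvKeyOf e == r
    · simp [ih]
    · simp [ih]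

-- characterization of B
theorem pvAlt_eq (entries : List (List (String × Option String))) :
    group_by_region_alt entries
      = ((PySem.Set.update pvOrder (entries.map pvKeyOf)).filter (pvP entries)).map
          (pvF entries) := by
  simp only [group_by_region_alt]
  rw [PySem.List.foldl_congr_mem (entries.map pvKeyOf)
      (fun (rs : List String) k => if rs.contains k then rs else rs ++ [k]) PySem.Set.add
      ["UK", "US", "AU", "NZ", "Global"] ?hadd]
  case hadd =>
    intro acc x _
    rw [PySem.Set.add_eq_ite]
    by_cases h : x ∈ acc <;> simp [h]
  rw [show List.foldl PySem.Set.add ["UK", "US", "AU", "NZ", "Global"] (entries.map pvKeyOf)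
      = PySem.Set.update pvOrder (entries.map pvKeyOf) from rfl]
  rw [PySem.List.foldl_congr_mem (PySem.Set.update pvOrder (entries.map pvKeyOf)) _
      (fun res r => if pvP entries r then res ++ [pvF entries r] else res) [] ?hbody]
  case hbody =>
    intro acc r _
    simp only [pvZip_eq, pvP, pvF]
  rw [PySem.List.foldl_append_if (pvP entries) (pvF entries)]
  simp

-- characterization of A
theorem pvA_eq (entries : List (List (String × Option String))) :
    group_by_region entries
      = (pvOrder.filter (pvP entries)).map (pvF entries)
        ++ ((pvGroups entries).items.filter (fun pr =>
              !(PySem.Set.contains (PySem.Set.ofList (pvOrder.filter (pvP entries))) pr.1)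
                && !pr.2.isEmpty)) := by
  simp only [group_by_region]
  rw [PySem.List.foldl_congr_mem entries _
      (fun d e => d.modify (pvKeyOf e) [] (· ++ [e]))
      (PySem.Dict.ofList (["UK", "US", "AU", "NZ", "Global"].map (fun r => (r, []))))
      (fun acc x _ => pvStep_eq_modify acc x)]
  rw [show (entries.foldl (fun d e => d.modify (pvKeyOf e) [] (· ++ [e]))
      (PySem.Dict.ofList (["UK", "US", "AU", "NZ", "Global"].map (fun r => (r, [])))))
      = pvGroups entries from rfl]
  rw [PySem.List.foldl_congr_mem ["UK", "US", "AU", "NZ", "Global"] _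
      (fun (rs : List (String × List (List (String × Option String))) × PySem.Set String) r =>
        (if pvP entries r then rs.1 ++ [pvF entries r] else rs.1,
         if pvP entries r then PySem.Set.add rs.2 r else rs.2))
      ([], PySem.Set.empty) ?hloop1]
  case hloop1 =>
    intro acc r _
    rw [pvGroups_getD]
    cases h : pvP entries r
    · simp only [pvP] at h
      simp [h, pvP]
    · simp only [pvP] at h
      simp [h, pvP, pvF]
  rw [PySem.List.foldl_prod_mk
      (fun acc r => if pvP entries r then acc ++ [pvF entries r] else acc)
      (fun acc r => if pvP entries r then PySem.Set.add acc r else acc)]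
  rw [PySem.List.foldl_append_if (pvP entries) (pvF entries)]
  rw [PySem.List.foldl_if_eq_foldl_filter (pvP entries) PySem.Set.add]
  rw [show (["UK", "US", "AU", "NZ", "Global"] : List String) = pvOrder from rfl]
  rw [show ((pvOrder.filter (pvP entries)).foldl PySem.Set.add PySem.Set.empty)
      = PySem.Set.ofList (pvOrder.filter (pvP entries)) from
      (PySem.Set.ofList_eq_foldl _).symm]
  rw [PySem.List.foldl_append_if_eq_filter]
  simp

theorem pvSeen_mem (entries : List (List (String × Option String))) (r : String) :
    r ∈ PySem.Set.ofList (pvOrder.filter (pvP entries)) ↔ r ∈ pvOrder ∧ pvP entries r := by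
  rw [PySem.Set.mem_ofList, List.mem_filter]

-- ===== VERDICT (by name: the statement is the Claim_ definition above) =====
theorem group_by_region_spec : Claim_equal_group_by_region := by
  intro entries _ _
  unfold Spec_group_by_region
  rw [pvA_eq, pvAlt_eq]
  have hitems : (pvGroups entries).items
      = (PySem.Set.update pvOrder (entries.map pvKeyOf)).map (pvF entries) := by
    rw [PySem.Dict.items_eq_map_keys (pvGroups entries) (pvGroups_nodup entries) []]
    rw [pvGroups_keys]
    exact List.map_congr_left (fun r _ => by rw [pvGroups_getD]; rfl)
  rw [hitems]
  rw [PySem.Set.update_eq_append_filter]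
  set seen := PySem.Set.ofList (pvOrder.filter (pvP entries)) with hseen
  set ex := (PySem.Set.ofList (entries.map pvKeyOf)).filter
    (fun y => !(PySem.Set.contains pvOrder y)) with hex
  have hexnotord : ∀ r ∈ ex, r ∉ pvOrder := by
    intro r hr
    rw [hex, List.mem_filter] at hr
    intro hro
    have h2 := hr.2
    simp [PySem.Set.contains_eq_listContains, hro] at h2
  simp only [List.map_append, List.filter_append, List.filter_map, Function.comp_def]
  have hord : pvOrder.filter (fun r => (!PySem.Set.contains seen (pvF entries r).1
      && !(pvF entries r).2.isEmpty)) = [] := by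
    rw [List.filter_eq_nil_iff]
    intro r hr
    simp only [pvF]
    by_cases hp : pvP entries r = true
    · have hm : r ∈ seen := (pvSeen_mem entries r).2 ⟨hr, hp⟩
      simp [PySem.Set.contains_eq_listContains, hm]
    · simp only [pvP, Bool.not_eq_true] at hp
      simp [hp]
  have hext : ex.filter (fun r => (!PySem.Set.contains seen (pvF entries r).1
      && !(pvF entries r).2.isEmpty)) = ex.filter (pvP entries) := by
    refine List.filter_congr ?_
    intro r hr
    have hro := hexnotord r hr
    have hns : r ∉ seen := fun hm => hro ((pvSeen_mem entries r).1 hm).1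
    simp [PySem.Set.contains_eq_listContains, hns, pvF, pvP]
  rw [hord, hext]
  simp
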